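-- pv_equiv track=rewrite | github.com/shaayok/cerebree_chatbot | chat.py | compose_context
-- ===== SOURCE A (Python) =====
-- def compose_context(documents, metadatas, cap=4000) -> str:
--     """Format KB chunks into a context string."""
--     out, used = [], 0
--     for d, m in zip(documents, metadatas):
--         src = m.get("file", m.get("source", "kb"))
--         seg = f"\n---\nSource: {src}\n---\n{d}"
--         if used + len(seg) > cap:
--             break
--         out.append(seg)
--         used += len(seg)
--     return "\n".join(out)
-- ===== SOURCE B (Python) =====
-- def compose_context(documents, metadatas, cap=4000) -> str:
--     """Format KB chunks into a context string (build-all, prefix-sum, cut, join)."""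
--     segs = [f"\n---\nSource: {m.get('file', m.get('source', 'kb'))}\n---\n{d}"
--             for d, m in zip(documents, metadatas)]
--     totals = []
--     t = 0
--     for s in segs:
--         t += len(s)
--         totals.append(t)
--     k = 0
--     while k < len(segs) and totals[k] <= cap:
--         k += 1
--     return "\n".join(segs[:k])
-- ===== Notes on version B (the rewrite author's own statement) =====
-- stated objective: alternative
-- what changed: Replaces A's fused format-check-break loop with a three-phase pipeline: build every formatted segment up front, compute running length totals, then cut the kept prefix at the first total exceeding the cap and join it.
import Mathlib
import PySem

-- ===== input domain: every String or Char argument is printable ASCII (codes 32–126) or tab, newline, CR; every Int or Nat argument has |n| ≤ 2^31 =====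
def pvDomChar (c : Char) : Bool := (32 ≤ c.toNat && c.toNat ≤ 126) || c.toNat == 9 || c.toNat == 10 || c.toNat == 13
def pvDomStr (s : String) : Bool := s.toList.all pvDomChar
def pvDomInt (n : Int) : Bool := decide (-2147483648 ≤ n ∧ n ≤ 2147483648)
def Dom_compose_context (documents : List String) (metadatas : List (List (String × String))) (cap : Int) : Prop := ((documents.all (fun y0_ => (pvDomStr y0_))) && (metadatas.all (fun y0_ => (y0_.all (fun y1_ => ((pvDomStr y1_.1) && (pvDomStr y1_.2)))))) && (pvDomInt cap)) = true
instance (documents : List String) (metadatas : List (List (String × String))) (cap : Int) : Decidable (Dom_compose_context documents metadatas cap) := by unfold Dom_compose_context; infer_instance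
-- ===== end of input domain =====

-- B replaces A's fused format-check-break loop by three phases (build all segments, prefix-sum lengths, cut & join); objective: alternative decomposition, same cost.

-- ===== PORT A =====
-- segment formatting shared by both Pythons verbatim: f"\n---\nSource: {src}\n---\n{d}"
-- with src = m.get("file", m.get("source", "kb")); the f-string is ported by hand as
-- string concatenation, exact on any input.
def pvSeg (d : String) (m : List (String × String)) : String :=
  "\n---\nSource: " ++ PySem.Dict.getD (PySem.Dict.mk m) "file" (PySem.Dict.getD (PySem.Dict.mk m) "source" "kb") ++ "\n---\n" ++ d

-- A's for-loop with break, as structural recursion over the zipped lists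
def pvLoopA (cap : Int) : List (String × List (String × String)) → Int → List String → List String
  | [], _, out => out
  | (d, m) :: rest, used, out =>
    let seg := pvSeg d m
    if used + PySem.Str.len seg > cap then out
    else pvLoopA cap rest (used + PySem.Str.len seg) (out ++ [seg])

def compose_context (documents : List String) (metadatas : List (List (String × String))) (cap : Int) : String :=
  PySem.Str.join "\n" (pvLoopA cap (documents.zip metadatas) 0 [])

-- ===== PORT B =====
-- running totals: totals[i] = len(segs[0]) + … + len(segs[i])
def pvTotals : List String → Int → List Int
  | [], _ => []
  | s :: rest, t => (t + PySem.Str.len s) :: pvTotals rest (t + PySem.Str.len s)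

-- the while loop: first index whose running total exceeds cap
def pvCut (cap : Int) : List Int → Nat
  | [] => 0
  | t :: rest => if t ≤ cap then pvCut cap rest + 1 else 0

def compose_context_alt (documents : List String) (metadatas : List (List (String × String))) (cap : Int) : String :=
  let segs := (documents.zip metadatas).map (fun p => pvSeg p.1 p.2)
  PySem.Str.join "\n" (segs.take (pvCut cap (pvTotals segs 0)))

-- ===== PRECONDITION & SPEC =====
def Spec_compose_context (documents : List String) (metadatas : List (List (String × String))) (cap : Int) (out : String) : Prop := out = compose_context_alt documents metadatas cap
instance (documents : List String) (metadatas : List (List (String × String))) (cap : Int) (out : String) : Decidable (Spec_compose_context documents metadatas cap out) := by unfold Spec_compose_context; infer_instance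

-- ===== CLAIM (what is proved, stated in full; the proofs are below) =====
def Claim_equal_compose_context : Prop := ∀ (documents : List String) (metadatas : List (List (String × String))) (cap : Int), Dom_compose_context documents metadatas cap → Spec_compose_context documents metadatas cap (compose_context documents metadatas cap)

-- ===== LEMMAS AND PROOFS =====
-- A's loop returns out ++ the prefix of the remaining segments cut at the first
-- running total (started at `used`) exceeding cap.
theorem pvLoopA_eq_take (cap : Int) (pairs : List (String × List (String × String))) :
    ∀ (used : Int) (out : List String),
      pvLoopA cap pairs used out =
        out ++ ((pairs.map (fun p => pvSeg p.1 p.2)).take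
          (pvCut cap (pvTotals (pairs.map (fun p => pvSeg p.1 p.2)) used))) := by
  induction pairs with
  | nil => intro used out; simp [pvLoopA, pvTotals, pvCut]
  | cons p rest ih =>
    intro used out
    obtain ⟨d, m⟩ := p
    simp only [pvLoopA, pvTotals, pvCut, List.map_cons]
    by_cases h : used + PySem.Str.len (pvSeg d m) > cap
    · rw [if_pos h, if_neg (by omega)]
      simp
    · rw [if_neg h, if_pos (by omega), ih]
      simp

-- ===== VERDICT (by name: the statement is the Claim_ definition above) =====
theorem compose_context_spec : Claim_equal_compose_context := by
  intro documents metadatas cap _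
  unfold Spec_compose_context compose_context compose_context_alt
  rw [pvLoopA_eq_take]
  simp
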